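-- pv_equiv track=rewrite | github.com/GarrettPetersen/three-kingdoms-tactics | tools/verify_voices.py | check_for_duplicates
-- ===== SOURCE A (Python) =====
-- def check_for_duplicates(lines):
--     """Check for duplicate voice IDs with different text"""
--     seen_ids = {}
--     duplicates = []
--     for line in lines:
--         line_id = line['id']
--         line_text = line['text']
--         if line_id in seen_ids:
--             if seen_ids[line_id] != line_text:
--                 duplicates.append({
--                     'id': line_id,
--                     'text1': seen_ids[line_id],
--                     'text2': line_text
--                 })
--         else:
--             seen_ids[line_id] = line_text
--     return duplicates
-- ===== SOURCE B (Python) =====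
-- def check_for_duplicates(lines):
--     """Check for duplicate voice IDs with different text"""
--     first_text = {}
--     for line in lines:
--         if line['id'] not in first_text:
--             first_text[line['id']] = line['text']
--     return [{'id': line['id'],
--              'text1': first_text[line['id']],
--              'text2': line['text']}
--             for line in lines
--             if first_text[line['id']] != line['text']]
-- ===== Notes on version B (the rewrite author's own statement) =====
-- stated objective: alternative
-- what changed: Replaces A's single interleaved pass (dict built and consulted while emitting conflicts) by two separate passes: first build a first-seen-text table, then a comprehension over the original lines emitting every line whose text differs from its id's first-seen text; first occurrences emit nothing, preserving A's output order.
import Mathlib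
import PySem

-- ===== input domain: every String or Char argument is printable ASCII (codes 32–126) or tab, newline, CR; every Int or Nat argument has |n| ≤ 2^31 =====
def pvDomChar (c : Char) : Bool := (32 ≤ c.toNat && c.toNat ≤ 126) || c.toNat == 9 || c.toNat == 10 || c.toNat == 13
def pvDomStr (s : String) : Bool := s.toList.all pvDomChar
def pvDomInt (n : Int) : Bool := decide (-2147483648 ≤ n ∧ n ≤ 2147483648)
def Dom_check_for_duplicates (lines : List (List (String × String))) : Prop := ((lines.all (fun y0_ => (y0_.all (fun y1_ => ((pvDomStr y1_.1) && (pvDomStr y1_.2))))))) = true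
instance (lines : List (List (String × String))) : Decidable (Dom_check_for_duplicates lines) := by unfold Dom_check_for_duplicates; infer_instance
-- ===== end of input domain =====

-- B separates A's single interleaved pass into two passes (build first-seen table, then
-- emit conflicts scanning the original lines); return values agree wherever A returns.

-- Shared primitive: Python's line['id'] / line['text'] on a dict given as an association
-- list (first match).  Under Pre_ the key is present, so the "" default never fires.
def pyItem? (line : List (String × String)) (k : String) : Option String :=
  (line.find? (fun p => p.1 == k)).map (·.2)

def pyItem (line : List (String × String)) (k : String) : String :=
  (pyItem? line k).getD ""

-- ===== PORT A =====
def goA (seen : PySem.Dict String String) (duplicates : List (List (String × String))) :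
    List (List (String × String)) → List (List (String × String))
  | [] => duplicates
  | line :: rest =>
    let line_id := pyItem line "id"
    let line_text := pyItem line "text"
    if seen.contains line_id then
      if seen.getD line_id "" ≠ line_text then
        goA seen (duplicates ++ [[("id", line_id), ("text1", seen.getD line_id ""), ("text2", line_text)]]) rest
      else
        goA seen duplicates rest
    else
      goA (seen.insert line_id line_text) duplicates rest

def check_for_duplicates (lines : List (List (String × String))) : List (List (String × String)) :=
  goA PySem.Dict.empty [] lines

-- ===== PORT B =====
-- first pass: first-seen text per id
def firstText (lines : List (List (String × String))) : PySem.Dict String String :=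
  lines.foldl
    (fun d line => if d.contains (pyItem line "id") then d else d.insert (pyItem line "id") (pyItem line "text"))
    PySem.Dict.empty

def check_for_duplicates_alt (lines : List (List (String × String))) : List (List (String × String)) :=
  let first_text := firstText lines
  (lines.filter (fun line => first_text.getD (pyItem line "id") "" ≠ pyItem line "text")).map
    (fun line => [("id", pyItem line "id"),
                  ("text1", first_text.getD (pyItem line "id") ""),
                  ("text2", pyItem line "text")])

-- ===== PRECONDITION & SPEC =====
-- Pre_ excludes exactly the lines on which Python's line['id'] / line['text'] raises KeyError.
def Pre_check_for_duplicates (lines : List (List (String × String))) : Prop :=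
  ∀ line ∈ lines, "id" ∈ line.map (·.1) ∧ "text" ∈ line.map (·.1)
instance (lines : List (List (String × String))) : Decidable (Pre_check_for_duplicates lines) := by
  unfold Pre_check_for_duplicates; infer_instance

def pvWitness_check_for_duplicates : (List (List (String × String))) :=
  [[("id", "v1"), ("text", "hello")], [("id", "v1"), ("text", "bye")]]

def Spec_check_for_duplicates (lines : List (List (String × String))) (out : List (List (String × String))) : Prop := out = check_for_duplicates_alt lines
instance (lines : List (List (String × String))) (out : List (List (String × String))) : Decidable (Spec_check_for_duplicates lines out) := by unfold Spec_check_for_duplicates; infer_instance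

-- ===== CLAIM (what is proved, stated in full; the proofs are below) =====
def Claim_equal_check_for_duplicates : Prop := ∀ (lines : List (List (String × String))), Dom_check_for_duplicates lines → Pre_check_for_duplicates lines → Spec_check_for_duplicates lines (check_for_duplicates lines)

-- ===== LEMMAS AND PROOFS =====

-- the emission of B restricted to a suffix, against a fixed table
def emitB (d : PySem.Dict String String) (rest : List (List (String × String))) :
    List (List (String × String)) :=
  (rest.filter (fun line => d.getD (pyItem line "id") "" ≠ pyItem line "text")).map
    (fun line => [("id", pyItem line "id"),
                  ("text1", d.getD (pyItem line "id") ""),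
                  ("text2", pyItem line "text")])

theorem firstText_append_singleton (p : List (List (String × String))) (l : List (String × String)) :
    firstText (p ++ [l]) =
      if (firstText p).contains (pyItem l "id") then firstText p
      else (firstText p).insert (pyItem l "id") (pyItem l "text") := by
  simp [firstText, List.foldl_append]

-- first-seen stability: a binding present after a prefix survives any extension
theorem firstText_stable (p q : List (List (String × String))) (k : String) (t : String)
    (h : (firstText p).get? k = some t) : (firstText (p ++ q)).get? k = some t := by
  induction q generalizing p with
  | nil => simpa using h
  | cons x q ih =>
    have h2 : (firstText (p ++ [x])).get? k = some t := by
      rw [firstText_append_singleton]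
      split
      · exact h
      · rename_i hnc
        by_cases hk : k = pyItem x "id"
        · exfalso
          rw [hk] at h
          have hcp : (firstText p).contains (pyItem x "id") = true := by
            rw [PySem.Dict.contains_eq_isSome_get?, h]; rfl
          rw [hcp] at hnc
          exact hnc rfl
        · rw [PySem.Dict.get?_insert_of_ne (hne := hk)]; exact h
    have : p ++ x :: q = (p ++ [x]) ++ q := by simp
    rw [this]
    exact ih _ h2

theorem goA_emitB (total : List (List (String × String))) :
    ∀ (rest p : List (List (String × String))), p ++ rest = total →
      ∀ dups, goA (firstText p) dups rest = dups ++ emitB (firstText total) rest := by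
  intro rest
  induction rest with
  | nil => intro p _ dups; simp [goA, emitB]
  | cons line rest ih =>
    intro p hpt dups
    have hsplit : (p ++ [line]) ++ rest = total := by simpa using hpt
    by_cases hc : (firstText p).contains (pyItem line "id") = true
    · -- id already seen: table unchanged, values at this id agree with the full table
      obtain ⟨t, ht⟩ : ∃ t, (firstText p).get? (pyItem line "id") = some t := by
        rw [PySem.Dict.contains_eq_isSome_get?] at hc
        exact Option.isSome_iff_exists.mp hc
      have htot : (firstText total).get? (pyItem line "id") = some t := by
        rw [← hpt]; exact firstText_stable p (line :: rest) _ t ht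
      have hvp : (firstText p).getD (pyItem line "id") "" = t := by
        rw [PySem.Dict.getD_eq_get?_getD, ht]; rfl
      have hvt : (firstText total).getD (pyItem line "id") "" = t := by
        rw [PySem.Dict.getD_eq_get?_getD, htot]; rfl
      have hnext : firstText (p ++ [line]) = firstText p := by
        rw [firstText_append_singleton, if_pos hc]
      have ihx := ih (p ++ [line]) hsplit
      rw [hnext] at ihx
      by_cases hne : t ≠ pyItem line "text"
      · rw [goA]
        simp only [hvp]
        rw [if_pos hc, if_pos hne, ihx]
        simp [emitB, hvt, hne]
      · rw [not_not] at hne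
        rw [goA]
        simp only [hvp]
        rw [if_pos hc, if_neg (not_not.mpr hne), ihx]
        simp [emitB, hvt, hne]
    · -- first occurrence: A inserts silently, B's predicate is false on this line
      have hnext : firstText (p ++ [line]) = (firstText p).insert (pyItem line "id") (pyItem line "text") := by
        rw [firstText_append_singleton, if_neg hc]
      have hins : (firstText (p ++ [line])).get? (pyItem line "id") = some (pyItem line "text") := by
        rw [hnext]; exact PySem.Dict.get?_insert_self _ _ _
      have htot : (firstText total).get? (pyItem line "id") = some (pyItem line "text") := by
        rw [← hsplit]; exact firstText_stable _ rest _ _ hins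
      have hvt : (firstText total).getD (pyItem line "id") "" = pyItem line "text" := by
        rw [PySem.Dict.getD_eq_get?_getD, htot]; rfl
      have ihx := ih (p ++ [line]) hsplit
      rw [hnext] at ihx
      rw [goA, if_neg hc, ihx]
      simp [emitB, hvt]

-- ===== VERDICT (by name: the statement is the Claim_ definition above) =====
theorem check_for_duplicates_spec : Claim_equal_check_for_duplicates := by
  intro lines _ _
  unfold Spec_check_for_duplicates check_for_duplicates check_for_duplicates_alt
  have := goA_emitB lines lines [] rfl []
  simpa [firstText, emitB] using this
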